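-- pv_equiv track=rewrite | github.com/Yunyao-Sun/IFTE0001-Group-G-CW | make_report_evidence3.py | extract_relevant_code_snippets
-- ===== SOURCE A (Python) =====
-- def extract_relevant_code_snippets(agent_code: str) -> str:
--     keywords = [
--         "RSI", "rsi", "rolling", "ewm",
--         "entry", "exit", "signal", "position",
--         "transaction", "cost", "return",
--         "generate_signals", "backtest",
--         "grid_search_rsi_params",
--         "compute_split_metrics"
--     ]
--
--     lines = agent_code.splitlines()
--     selected_indices = set()
--
--     for i, line in enumerate(lines):
--         for kw in keywords:
--             if kw in line:
--                 for j in range(max(0, i - 6), min(len(lines), i + 8)):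
--                     selected_indices.add(j)
--
--     selected_lines = [lines[i] for i in sorted(selected_indices)]
--
--     if not selected_lines:
--         return "No relevant code snippets found in src/agent.py."
--
--     return "\n".join(selected_lines)
-- ===== SOURCE B (Python) =====
-- def extract_relevant_code_snippets(agent_code: str) -> str:
--     keywords = [
--         "RSI", "rsi", "rolling", "ewm",
--         "entry", "exit", "signal", "position",
--         "transaction", "cost", "return",
--         "generate_signals", "backtest",
--         "grid_search_rsi_params",
--         "compute_split_metrics"
--     ]
--
--     lines = agent_code.splitlines()
--     # one pass to mark keyword hits, then keep each line whose 14-line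
--     # neighbourhood hits[j-7 : j+7] contains a match
--     hits = [any(kw in line for kw in keywords) for line in lines]
--     selected_lines = [line for j, line in enumerate(lines)
--                       if any(hits[max(0, j - 7):j + 7])]
--
--     if not selected_lines:
--         return "No relevant code snippets found in src/agent.py."
--
--     return "\n".join(selected_lines)
-- ===== Notes on version B (the rewrite author's own statement) =====
-- stated objective: alternative
-- what changed: A marks a set of line indices around every keyword match and then sorts the set; B computes a hit flag per line once and keeps each line whose 14-line flag neighbourhood contains a hit, a single filter with no set and no sort.
import Mathlib
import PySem

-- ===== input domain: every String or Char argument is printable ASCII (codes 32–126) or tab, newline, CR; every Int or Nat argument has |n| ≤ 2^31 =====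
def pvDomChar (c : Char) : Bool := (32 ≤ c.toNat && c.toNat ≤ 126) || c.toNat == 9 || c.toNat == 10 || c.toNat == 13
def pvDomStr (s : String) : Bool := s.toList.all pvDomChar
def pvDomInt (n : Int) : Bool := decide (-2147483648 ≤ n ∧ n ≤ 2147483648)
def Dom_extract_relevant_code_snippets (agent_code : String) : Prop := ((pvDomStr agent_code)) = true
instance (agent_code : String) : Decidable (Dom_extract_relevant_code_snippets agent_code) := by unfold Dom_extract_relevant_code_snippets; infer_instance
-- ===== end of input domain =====

-- B replaces A's "mark a set of indices per match, then sort" by a single filter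
-- keeping each line whose 14-line neighbourhood of hit flags contains a match
-- (objective: alternative decomposition, same cost).

def pvKeywords : List String :=
  ["RSI", "rsi", "rolling", "ewm",
   "entry", "exit", "signal", "position",
   "transaction", "cost", "return",
   "generate_signals", "backtest",
   "grid_search_rsi_params",
   "compute_split_metrics"]

-- ===== PORT A =====
def extract_relevant_code_snippets (agent_code : String) : String :=
  let lines := PySem.Str.splitlines agent_code
  let selected_indices : PySem.Set Int :=
    (PySem.List.enumerate lines 0).foldl (fun s p =>
      pvKeywords.foldl (fun s kw =>
        if PySem.Str.isIn kw p.2 then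
          (PySem.List.pyRange (max 0 (p.1 - 6)) (min (lines.length : Int) (p.1 + 8)) 1).foldl
            PySem.Set.add s
        else s) s) PySem.Set.empty
  let selected_lines :=
    (PySem.List.sorted selected_indices (fun x => x) false).map
      (fun i => PySem.List.pyGetD lines i "")
  if selected_lines = [] then "No relevant code snippets found in src/agent.py."
  else PySem.Str.join "\n" selected_lines

-- ===== PORT B =====
def extract_relevant_code_snippets_alt (agent_code : String) : String :=
  let lines := PySem.Str.splitlines agent_code
  let hits := lines.map (fun line => pvKeywords.any (fun kw => PySem.Str.isIn kw line))
  let selected_lines :=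
    ((PySem.List.enumerate lines 0).filter (fun p =>
        (PySem.List.slice hits (some (max 0 (p.1 - 7))) (some (p.1 + 7))).any (fun b => b))).map
      (·.2)
  if selected_lines = [] then "No relevant code snippets found in src/agent.py."
  else PySem.Str.join "\n" selected_lines

-- ===== PRECONDITION & SPEC =====
def Spec_extract_relevant_code_snippets (agent_code : String) (out : String) : Prop := out = extract_relevant_code_snippets_alt agent_code
instance (agent_code : String) (out : String) : Decidable (Spec_extract_relevant_code_snippets agent_code out) := by unfold Spec_extract_relevant_code_snippets; infer_instance

-- ===== CLAIM (what is proved, stated in full; the proofs are below) =====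
def Claim_equal_extract_relevant_code_snippets : Prop := ∀ (agent_code : String), Dom_extract_relevant_code_snippets agent_code → Spec_extract_relevant_code_snippets agent_code (extract_relevant_code_snippets agent_code)

-- ===== LEMMAS AND PROOFS =====

theorem pv_mem_inner (l : List String) (line : String) (r : List Int) (s : PySem.Set Int) (j : Int) :
    j ∈ l.foldl (fun s kw => if PySem.Str.isIn kw line then r.foldl PySem.Set.add s else s) s ↔
      j ∈ s ∨ (l.any (fun kw => PySem.Str.isIn kw line) ∧ j ∈ r) := by
  induction l generalizing s with
  | nil => simp
  | cons kw l ih =>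
    simp only [List.foldl_cons, List.any_cons]
    by_cases h : PySem.Str.isIn kw line = true
    · rw [if_pos h, ih]
      have e : (List.foldl PySem.Set.add s r) = PySem.Set.update s r := rfl
      rw [e, PySem.Set.mem_update]
      simp at h
      simp [h]; tauto
    · rw [if_neg h, ih]
      simp at h
      simp [h]

theorem pv_mem_outer (lines : List String) (l : List (Int × String)) (s : PySem.Set Int) (j : Int) :
    j ∈ l.foldl (fun s p =>
        pvKeywords.foldl (fun s kw =>
          if PySem.Str.isIn kw p.2 then
            (PySem.List.pyRange (max 0 (p.1 - 6)) (min (lines.length : Int) (p.1 + 8)) 1).foldl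
              PySem.Set.add s
          else s) s) s ↔
      j ∈ s ∨ ∃ p ∈ l, pvKeywords.any (fun kw => PySem.Str.isIn kw p.2) ∧
        j ∈ PySem.List.pyRange (max 0 (p.1 - 6)) (min (lines.length : Int) (p.1 + 8)) 1 := by
  induction l generalizing s with
  | nil => simp
  | cons p l ih =>
    rw [List.foldl_cons, ih, pv_mem_inner]
    simp only [List.mem_cons]
    constructor
    · rintro ((h | ⟨h1, h2⟩) | ⟨q, hq, h⟩)
      · exact Or.inl h
      · exact Or.inr ⟨p, Or.inl rfl, h1, h2⟩
      · exact Or.inr ⟨q, Or.inr hq, h⟩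
    · rintro (h | ⟨q, (rfl | hq), h⟩)
      · exact Or.inl (Or.inl h)
      · exact Or.inl (Or.inr h)
      · exact Or.inr ⟨q, hq, h⟩

theorem pv_nodup_inner (l : List String) (line : String) (r : List Int) (s : PySem.Set Int)
    (hs : s.Nodup) :
    (l.foldl (fun s kw => if PySem.Str.isIn kw line then r.foldl PySem.Set.add s else s) s).Nodup := by
  induction l generalizing s with
  | nil => exact hs
  | cons kw l ih =>
    rw [List.foldl_cons]
    by_cases h : PySem.Str.isIn kw line = true
    · rw [if_pos h]
      have e : (List.foldl PySem.Set.add s r) = PySem.Set.update s r := rfl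
      rw [e]
      exact ih _ (PySem.Set.nodup_update s r hs)
    · rw [if_neg h]; exact ih _ hs

theorem pv_nodup_outer (lines : List String) (l : List (Int × String)) (s : PySem.Set Int)
    (hs : s.Nodup) :
    (l.foldl (fun s p =>
        pvKeywords.foldl (fun s kw =>
          if PySem.Str.isIn kw p.2 then
            (PySem.List.pyRange (max 0 (p.1 - 6)) (min (lines.length : Int) (p.1 + 8)) 1).foldl
              PySem.Set.add s
          else s) s) s).Nodup := by
  induction l generalizing s with
  | nil => exact hs
  | cons p l ih =>
    rw [List.foldl_cons]
    exact ih _ (pv_nodup_inner _ _ _ _ hs)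

theorem pv_any_drop_take (xs : List Bool) (a t : Nat) :
    ((xs.drop a).take t).any (fun b => b) = true ↔
      ∃ i, ∃ _ : i < xs.length, a ≤ i ∧ i < a + t ∧ xs[i] = true := by
  rw [List.any_eq_true]
  constructor
  · rintro ⟨x, hx, hb⟩
    obtain ⟨k, hk, he⟩ := List.mem_iff_getElem.mp hx
    have hk' := hk
    simp [List.length_take, List.length_drop] at hk'
    have hlen : a + k < xs.length := by omega
    refine ⟨a + k, hlen, by omega, by omega, ?_⟩
    have : ((xs.drop a).take t)[k] = xs[a + k] := by
      rw [List.getElem_take, List.getElem_drop]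
    rw [this] at he; rw [he]
    simpa using hb
  · rintro ⟨i, hlen, hai, hit, hv⟩
    refine ⟨true, ?_, rfl⟩
    rw [List.mem_iff_getElem]
    have hk : i - a < ((xs.drop a).take t).length := by
      simp [List.length_take, List.length_drop]; omega
    refine ⟨i - a, hk, ?_⟩
    have : ((xs.drop a).take t)[i - a] = xs[a + (i - a)] := by
      rw [List.getElem_take, List.getElem_drop]
    rw [this]
    have : a + (i - a) = i := by omega
    simp [this, hv]

theorem pv_key_iff (lines : List String) (j : Int) :
    (∃ p ∈ PySem.List.enumerate lines 0,
        (pvKeywords.any (fun kw => PySem.Str.isIn kw p.2)) = true ∧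
        j ∈ PySem.List.pyRange (max 0 (p.1 - 6)) (min (lines.length : Int) (p.1 + 8)) 1)
    ↔ (0 ≤ j ∧ j < (lines.length : Int) ∧
       ((PySem.List.slice (lines.map (fun line => pvKeywords.any (fun kw => PySem.Str.isIn kw line)))
          (some (max 0 (j - 7))) (some (j + 7))).any (fun b => b)) = true) := by
  constructor
  · rintro ⟨p, hp, hhit, hj⟩
    obtain ⟨k, hk, rfl⟩ := (PySem.List.mem_enumerate_iff _ _ _).mp hp
    simp only [zero_add] at *
    rw [PySem.List.mem_pyRange_one] at hj
    obtain ⟨hj1, hj2⟩ := hj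
    have h0j : 0 ≤ j := by omega
    have hjn : j < (lines.length : Int) := by omega
    refine ⟨h0j, hjn, ?_⟩
    rw [PySem.List.slice_toNat _ (by omega) (by omega)]
    rw [pv_any_drop_take]
    refine ⟨k, by simpa using hk, by omega, by omega, ?_⟩
    simpa using hhit
  · rintro ⟨h0, hn', hany⟩
    rw [PySem.List.slice_toNat _ (by omega) (by omega)] at hany
    rw [pv_any_drop_take] at hany
    obtain ⟨i, hi, hai, hit, hv⟩ := hany
    rw [List.length_map] at hi
    refine ⟨((i : Int), lines[i]), ?_, ?_, ?_⟩
    · exact (PySem.List.mem_enumerate_iff _ _ _).mpr ⟨i, hi, by simp⟩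
    · simpa using hv
    · rw [PySem.List.mem_pyRange_one]
      constructor <;> omega

theorem pv_lists_eq (lines : List String) :
    (PySem.List.sorted
        ((PySem.List.enumerate lines 0).foldl (fun s p =>
          pvKeywords.foldl (fun s kw =>
            if PySem.Str.isIn kw p.2 then
              (PySem.List.pyRange (max 0 (p.1 - 6)) (min (lines.length : Int) (p.1 + 8)) 1).foldl
                PySem.Set.add s
            else s) s) PySem.Set.empty) (fun x => x) false).map
      (fun i => PySem.List.pyGetD lines i "")
    = ((PySem.List.enumerate lines 0).filter (fun p =>
        (PySem.List.slice (lines.map (fun line => pvKeywords.any (fun kw => PySem.Str.isIn kw line)))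
          (some (max 0 (p.1 - 7))) (some (p.1 + 7))).any (fun b => b))).map (·.2) := by
  have hsorted : PySem.List.sorted
        ((PySem.List.enumerate lines 0).foldl (fun s p =>
          pvKeywords.foldl (fun s kw =>
            if PySem.Str.isIn kw p.2 then
              (PySem.List.pyRange (max 0 (p.1 - 6)) (min (lines.length : Int) (p.1 + 8)) 1).foldl
                PySem.Set.add s
            else s) s) PySem.Set.empty) (fun x => x) false
      = (PySem.List.pyRange 0 (lines.length : Int) 1).filter (fun j =>
          (PySem.List.slice (lines.map (fun line => pvKeywords.any (fun kw => PySem.Str.isIn kw line)))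
            (some (max 0 (j - 7))) (some (j + 7))).any (fun b => b)) := by
    apply PySem.List.sorted_eq_of_perm_of_pairwise_lt
    · rw [List.perm_ext_iff_of_nodup
        ((PySem.List.nodup_pyRange_one _ _).filter _)
        (pv_nodup_outer lines _ PySem.Set.empty (by simp [PySem.Set.empty]))]
      intro j
      rw [List.mem_filter, pv_mem_outer, PySem.List.mem_pyRange_one]
      have := pv_key_iff lines j
      constructor
      · rintro ⟨⟨h0, hn⟩, hq⟩
        exact Or.inr (this.mpr ⟨h0, hn, hq⟩)
      · rintro (h | h)
        · simp at h
        · obtain ⟨h0, hn, hq⟩ := this.mp h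
          exact ⟨⟨h0, hn⟩, hq⟩
    · exact (PySem.List.pairwise_lt_pyRange_one _ _).filter _
  rw [hsorted]
  rw [PySem.List.enumerate_eq_map_pyRange lines "", List.filter_map, List.map_map]
  simp [Function.comp_def]

theorem extract_relevant_code_snippets_spec' (agent_code : String) :
    extract_relevant_code_snippets agent_code = extract_relevant_code_snippets_alt agent_code := by
  simp only [extract_relevant_code_snippets, extract_relevant_code_snippets_alt]
  rw [pv_lists_eq]

-- ===== VERDICT (by name: the statement is the Claim_ definition above) =====
theorem extract_relevant_code_snippets_spec : Claim_equal_extract_relevant_code_snippets := by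
  intro agent_code _
  exact extract_relevant_code_snippets_spec' agent_code
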